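-- pv_equiv track=rewrite | github.com/gunbarif-wq/krinv-auto | build_ml_dataset.py | day_boundaries
-- ===== SOURCE A (Python) =====
-- from typing import Dict, List
--
-- def day_boundaries(dates: List[str]) -> List[tuple[int, int]]:
--     if not dates:
--         return []
--     bounds: List[tuple[int, int]] = []
--     start = 0
--     cur_day = dates[0][:10] if len(dates[0]) >= 10 else ""
--     for i, dt in enumerate(dates):
--         day = dt[:10] if len(dt) >= 10 else ""
--         if day != cur_day:
--             bounds.append((start, i))
--             start = i
--             cur_day = day
--     bounds.append((start, len(dates)))
--     return bounds
-- ===== SOURCE B (Python) =====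
-- from typing import List
--
-- def day_boundaries(dates: List[str]) -> List[tuple[int, int]]:
--     if not dates:
--         return []
--     keys = [dt[:10] if len(dt) >= 10 else "" for dt in dates]
--
--     def solve(lo: int, hi: int) -> List[tuple[int, int]]:
--         # run ranges of the index interval [lo, hi), hi - lo >= 1
--         if hi - lo == 1:
--             return [(lo, hi)]
--         mid = (lo + hi) // 2
--         left = solve(lo, mid)
--         right = solve(mid, hi)
--         if keys[mid] == keys[mid - 1]:
--             # the run spanning the split point: fuse left's last with right's first
--             return left[:-1] + [(left[-1][0], right[0][1])] + right[1:]
--         return left + right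
--
--     return solve(0, len(dates))
-- ===== Notes on version B (the rewrite author's own statement) =====
-- stated objective: alternative
-- what changed: Replaces A's single stateful left-to-right scan (carrying bounds/start/cur_day) with a divide-and-conquer recursion: split the index interval at its midpoint, recursively compute each half's run ranges, and fuse the two boundary runs when the day-key matches across the split.
import Mathlib
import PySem

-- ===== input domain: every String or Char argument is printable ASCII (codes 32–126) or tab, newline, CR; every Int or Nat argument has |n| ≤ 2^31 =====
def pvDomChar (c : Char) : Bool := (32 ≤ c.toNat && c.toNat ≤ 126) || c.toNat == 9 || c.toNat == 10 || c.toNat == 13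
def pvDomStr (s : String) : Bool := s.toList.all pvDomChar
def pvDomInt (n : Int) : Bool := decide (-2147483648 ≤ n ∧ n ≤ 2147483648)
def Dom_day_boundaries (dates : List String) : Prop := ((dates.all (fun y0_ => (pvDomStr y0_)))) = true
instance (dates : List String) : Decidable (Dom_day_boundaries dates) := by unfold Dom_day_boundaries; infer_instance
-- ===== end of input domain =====

-- B replaces A's single stateful left-to-right scan by a divide-and-conquer recursion that
-- computes each half's run ranges and fuses the runs meeting at the split; same return value.

-- ===== PORT A =====
-- dt[:10] if len(dt) >= 10 else ""   (shared subexpression of both Pythons)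
def pvDayKey (dt : String) : String :=
  if PySem.Str.len dt ≥ 10 then PySem.Str.slice dt none (some 10) else ""

-- the body of A's for-loop over enumerate(dates), state = (bounds, start, cur_day)
def pvStepA (st : List (Int × Int) × Int × String) (p : Int × String) :
    List (Int × Int) × Int × String :=
  let day := pvDayKey p.2
  if day ≠ st.2.2 then (st.1 ++ [(st.2.1, p.1)], p.1, day) else st

def day_boundaries (dates : List String) : List (Int × Int) :=
  match dates with
  | [] => []
  | d0 :: _ =>
    let st := (PySem.List.enumerate dates).foldl pvStepA ([], 0, pvDayKey d0)
    st.1 ++ [(st.2.1, (dates.length : Int))]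

-- ===== PORT B =====
-- Source B's inner 'solve(lo, hi)'; the fuel argument only makes the recursion total
-- (fuel = hi - lo at the top call always suffices, as pvSolve_eq below shows).
def pvSolve (keys : List String) : Nat → Int → Int → List (Int × Int)
  | 0, _, _ => []
  | f + 1, lo, hi =>
    if hi - lo = 1 then [(lo, hi)]
    else
      let mid := PySem.Int.floordiv (lo + hi) 2
      let left := pvSolve keys f lo mid
      let right := pvSolve keys f mid hi
      if PySem.List.pyGet? keys mid = PySem.List.pyGet? keys (mid - 1) then
        PySem.List.slice left none (some (-1)) ++
          [(((PySem.List.pyGet? left (-1)).getD (0, 0)).1,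
            ((PySem.List.pyGet? right 0).getD (0, 0)).2)] ++
          PySem.List.slice right (some 1) none
      else left ++ right

def day_boundaries_alt (dates : List String) : List (Int × Int) :=
  if dates = [] then [] else
    pvSolve (dates.map pvDayKey) dates.length 0 (dates.length : Int)

-- ===== PRECONDITION & SPEC =====
def Spec_day_boundaries (dates : List String) (out : List (Int × Int)) : Prop := out = day_boundaries_alt dates
instance (dates : List String) (out : List (Int × Int)) : Decidable (Spec_day_boundaries dates out) := by unfold Spec_day_boundaries; infer_instance

-- ===== CLAIM (what is proved, stated in full; the proofs are below) =====
def Claim_equal_day_boundaries : Prop := ∀ (dates : List String), Dom_day_boundaries dates → Spec_day_boundaries dates (day_boundaries dates)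

-- ===== LEMMAS AND PROOFS =====

-- reference form: the run ranges of a key list, built by recursion on the list
def pvGrp : Int → List String → List (Int × Int)
  | _, [] => []
  | off, [_] => [(off, off + 1)]
  | off, k :: k' :: ks =>
    let r := pvGrp (off + 1) (k' :: ks)
    if k' = k then
      match r with
      | (_, e) :: rs => (off, e) :: rs
      | [] => []
    else (off, off + 1) :: r

-- A's loop as sequential grouping (current key, run start, current index, total end)
def pvGo (cur : String) (ks : List String) (st i N : Int) : List (Int × Int) :=
  match ks with
  | [] => [(st, N)]
  | k :: ks' => if k ≠ cur then (st, i) :: pvGo k ks' i (i + 1) N else pvGo cur ks' st (i + 1) N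

theorem pvGrp_head : ∀ (l : List String) (off : Int), l ≠ [] →
    ∃ e rs, pvGrp off l = (off, e) :: rs := by
  intro l
  induction l with
  | nil => intro off h; exact absurd rfl h
  | cons k t ih =>
    intro off _
    match t with
    | [] => exact ⟨off + 1, [], rfl⟩
    | k' :: ks =>
      obtain ⟨e, rs, hr⟩ := ih (off + 1) (by simp)
      by_cases h : k' = k
      · refine ⟨e, rs, ?_⟩
        simp only [pvGrp, hr, if_pos h]
      · exact ⟨off + 1, pvGrp (off + 1) (k' :: ks), by simp only [pvGrp, if_neg h]⟩

theorem pvFoldA (l : List String) (s : Int) (acc : List (Int × Int)) (st0 : Int)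
    (cur : String) (N : Int) :
    ((PySem.List.enumerate l s).foldl pvStepA (acc, st0, cur)).1 ++
      [(((PySem.List.enumerate l s).foldl pvStepA (acc, st0, cur)).2.1, N)]
    = acc ++ pvGo cur (l.map pvDayKey) st0 s N := by
  induction l generalizing s acc st0 cur with
  | nil => simp [PySem.List.enumerate_nil, pvGo]
  | cons d l ih =>
    rw [PySem.List.enumerate_cons]
    by_cases h : pvDayKey d ≠ cur
    · simp only [List.foldl_cons, pvStepA, List.map_cons, pvGo, if_pos h]
      rw [ih]
      simp
    · simp only [List.foldl_cons, pvStepA, List.map_cons, pvGo, if_neg h]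
      exact ih _ _ _ _

theorem pvGo_eq_grp : ∀ (ks : List String) (k : String) (st i : Int),
    pvGo k ks st i (i + ks.length)
      = match pvGrp (i - 1) (k :: ks) with
        | (_, e) :: rs => (st, e) :: rs
        | [] => [] := by
  intro ks
  induction ks with
  | nil => intro k st i; simp [pvGo, pvGrp]
  | cons k' ks' ih =>
    intro k st i
    have hi : i - 1 + 1 = i := by ring
    have hlen : i + ((k' :: ks').length : Int) = (i + 1) + (ks'.length : Int) := by
      simp only [List.length_cons]; push_cast; ring
    by_cases h : k' = k
    · subst h
      obtain ⟨e, rs, hr⟩ := pvGrp_head (k' :: ks') i (by simp)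
      have ihs := ih k' st (i + 1)
      rw [show i + 1 - 1 = i by ring] at ihs
      rw [show pvGo k' (k' :: ks') st i (i + ((k' :: ks').length : Int))
            = pvGo k' ks' st (i + 1) (i + ((k' :: ks').length : Int)) from by
          simp [pvGo]]
      rw [hlen, ihs]
      simp [pvGrp, hi, hr]
    · obtain ⟨e, rs, hr⟩ := pvGrp_head (k' :: ks') i (by simp)
      have ihs := ih k' i (i + 1)
      rw [show i + 1 - 1 = i by ring] at ihs
      rw [show pvGo k (k' :: ks') st i (i + ((k' :: ks').length : Int))
            = (st, i) :: pvGo k' ks' i (i + 1) (i + ((k' :: ks').length : Int)) from by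
          simp [pvGo, h]]
      rw [hlen, ihs]
      simp only [pvGrp, hi, hr, if_neg h]

-- the divide-and-conquer merge law for pvGrp
theorem pvGrp_append : ∀ (xs : List String) (x y : String) (ys : List String) (off : Int),
    xs.getLast? = some x →
    pvGrp off (xs ++ y :: ys)
      = if y = x then
          (pvGrp off xs).dropLast ++
            [((((pvGrp off xs).getLast?).getD (0, 0)).1,
              (((pvGrp (off + xs.length) (y :: ys))[0]?).getD (0, 0)).2)] ++
            (pvGrp (off + xs.length) (y :: ys)).tail
        else pvGrp off xs ++ pvGrp (off + xs.length) (y :: ys) := by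
  intro xs
  induction xs with
  | nil => intro x y ys off h; simp at h
  | cons x0 t ih =>
    intro x y ys off h
    match t with
    | [] =>
      obtain rfl : x0 = x := by simpa using h
      obtain ⟨e, rs, hr⟩ := pvGrp_head (y :: ys) (off + 1) (by simp)
      have hoff : off + (([x0] : List String).length : Int) = off + 1 := by simp
      rw [hoff]
      by_cases hy : y = x0
      · simp only [List.cons_append, List.nil_append, pvGrp, hr, if_pos hy]
        simp
      · simp only [List.cons_append, List.nil_append, pvGrp, hr, if_neg hy]
    | x1 :: t' =>
      have h' : (x1 :: t').getLast? = some x := by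
        rwa [List.getLast?_cons_cons] at h
      obtain ⟨e, ls, hL⟩ := pvGrp_head (x1 :: t') (off + 1) (by simp)
      obtain ⟨e', rs, hR⟩ := pvGrp_head (y :: ys) (off + ((x0 :: x1 :: t').length : Int)) (by simp)
      have hoff : off + 1 + ((x1 :: t').length : Int) = off + ((x0 :: x1 :: t').length : Int) := by
        simp only [List.length_cons]; push_cast; ring
      have hih := ih x y ys (off + 1) h'
      rw [hoff] at hih
      simp only [List.cons_append] at hih
      by_cases hy : y = x
      · rw [if_pos hy] at hih
        by_cases hx : x1 = x0
        · cases ls with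
          | nil =>
            simp only [List.cons_append, pvGrp, if_pos hx]
            rw [hih]
            simp [hL, hy]
          | cons l0 ls' =>
            simp only [List.cons_append, pvGrp, if_pos hx]
            rw [hih]
            simp [hL, hy]
        · simp only [List.cons_append, pvGrp, if_neg hx]
          rw [hih]
          simp [hL, hy]
      · rw [if_neg hy] at hih
        by_cases hx : x1 = x0
        · simp only [List.cons_append, pvGrp, if_pos hx]
          rw [hih]
          simp [hL, hy]
        · simp only [List.cons_append, pvGrp, if_neg hx]
          rw [hih]
          simp [hL, hy]

theorem pvSolve_eq (f : Nat) : ∀ (keys : List String) (lo hi : Nat), lo < hi →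
    hi ≤ keys.length → hi - lo ≤ f →
    pvSolve keys f (lo : Int) (hi : Int) = pvGrp (lo : Int) ((keys.drop lo).take (hi - lo)) := by
  induction f with
  | zero => intro keys lo hi h1 h2 h3; omega
  | succ f ih =>
    intro keys lo hi h1 h2 h3
    by_cases hbase : hi - lo = 1
    · -- single element
      have hlo : lo < keys.length := by omega
      rw [show (hi : Int) = (lo : Int) + 1 by omega]
      simp only [pvSolve, if_pos (by omega : ((lo : Int) + 1) - lo = 1)]
      rw [hbase]
      have ht : List.take 1 (List.drop lo keys) = [keys[lo]] := by
        rw [List.take_one, List.head?_drop, List.getElem?_eq_getElem hlo]; rfl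
      rw [ht]
      simp [pvGrp]
    · -- split at mid
      set midN : Nat := (lo + hi) / 2 with hmid
      have hm1 : lo < midN := by omega
      have hm2 : midN < hi := by omega
      have hmidI : PySem.Int.floordiv ((lo : Int) + (hi : Int)) 2 = (midN : Int) := by
        rw [PySem.Int.floordiv_eq_ediv_of_pos (by omega)]
        omega
      have hL := ih keys lo midN hm1 (by omega) (by omega)
      have hR := ih keys midN hi hm2 h2 (by omega)
      -- index facts
      have hmlt : midN < keys.length := by omega
      have hm1lt : midN - 1 < keys.length := by omega
      -- the two segments
      set xs := List.take (midN - lo) (List.drop lo keys) with hxs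
      set yt := List.take (hi - midN) (List.drop midN keys) with hyt
      have hsplit : List.take (hi - lo) (List.drop lo keys) = xs ++ yt := by
        rw [show hi - lo = (midN - lo) + (hi - midN) by omega, List.take_add, List.drop_drop]
        rw [show lo + (midN - lo) = midN by omega]
      have hxlen : xs.length = midN - lo := by
        rw [hxs, List.length_take, List.length_drop]; omega
      have hycons : yt = keys[midN] :: List.take (hi - midN - 1) (List.drop (midN + 1) keys) := by
        rw [hyt, List.drop_eq_getElem_cons hmlt,
            show hi - midN = (hi - midN - 1) + 1 by omega, List.take_succ_cons]
        simp
      have hxlast : xs.getLast? = some keys[midN - 1] := by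
        rw [List.getLast?_eq_getElem?, hxlen]
        rw [hxs, List.getElem?_take_of_lt (by omega), List.getElem?_drop]
        rw [show lo + (midN - lo - 1) = midN - 1 by omega, List.getElem?_eq_getElem hm1lt]
      -- unfold one step of pvSolve
      simp only [pvSolve, if_neg (show ¬((hi : Int) - (lo : Int) = 1) by omega), hmidI]
      rw [show (midN : Int) - 1 = ((midN - 1 : Nat) : Int) by omega]
      rw [PySem.List.pyGet?_natCast, PySem.List.pyGet?_natCast,
          List.getElem?_eq_getElem hmlt, List.getElem?_eq_getElem hm1lt]
      rw [hL, hR, hsplit]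
      rw [show List.take (hi - midN) (List.drop midN keys) = yt from rfl] at *
      rw [hycons]
      have happ := pvGrp_append xs keys[midN - 1] keys[midN]
        (List.take (hi - midN - 1) (List.drop (midN + 1) keys)) (lo : Int) hxlast
      have hoffm : (lo : Int) + (xs.length : Int) = (midN : Int) := by
        rw [hxlen]; omega
      rw [hoffm] at happ
      rw [happ]
      by_cases hk : keys[midN] = keys[midN - 1]
      · rw [if_pos (by rw [hk]), if_pos hk]
        rw [PySem.List.slice_to_neg_one, PySem.List.pyGet?_neg_one,
            PySem.List.slice_from_one, PySem.List.pyGet?_zero]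
      · rw [if_neg (by simpa using hk), if_neg hk]

-- ===== VERDICT (by name: the statement is the Claim_ definition above) =====
theorem day_boundaries_spec : Claim_equal_day_boundaries := by
  intro dates _
  unfold Spec_day_boundaries
  match dates with
  | [] => rfl
  | d0 :: rest =>
    have hne : (d0 :: rest : List String) ≠ [] := List.cons_ne_nil d0 rest
    simp only [day_boundaries, day_boundaries_alt, if_neg hne]
    have hfold := pvFoldA (d0 :: rest) 0 [] 0 (pvDayKey d0) (((d0 :: rest).length : Int))
    simp only [List.nil_append] at hfold
    rw [hfold]
    rw [show (d0 :: rest).map pvDayKey = pvDayKey d0 :: rest.map pvDayKey from rfl]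
    rw [show pvGo (pvDayKey d0) (pvDayKey d0 :: rest.map pvDayKey) 0 0 (((d0 :: rest).length : Int))
          = pvGo (pvDayKey d0) (rest.map pvDayKey) 0 1 (((d0 :: rest).length : Int)) from by
        simp [pvGo]]
    rw [show (((d0 :: rest).length : Nat) : Int) = 1 + ((rest.map pvDayKey).length : Int) from by
        simp; omega]
    rw [pvGo_eq_grp]
    obtain ⟨e, rs, hg⟩ := pvGrp_head (pvDayKey d0 :: rest.map pvDayKey) 0 (by simp)
    rw [show (1 : Int) - 1 = 0 from by ring, hg]
    rw [show (1 : Int) + ((rest.map pvDayKey).length : Int) = ((d0 :: rest).length : Int) from by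
        simp; omega]
    have hsolve := pvSolve_eq ((d0 :: rest).length) ((d0 :: rest).map pvDayKey)
      0 ((d0 :: rest).length) (by simp) (by simp) (by omega)
    simp only [Nat.cast_zero, Nat.sub_zero, List.drop_zero] at hsolve
    rw [show List.take (d0 :: rest).length ((d0 :: rest).map pvDayKey)
          = (d0 :: rest).map pvDayKey from by
        rw [show (d0 :: rest).length = ((d0 :: rest).map pvDayKey).length from by simp,
            List.take_length]] at hsolve
    simp only [List.map_cons] at hsolve
    rw [hsolve, hg]
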